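-- pv_equiv track=rewrite | github.com/kmransom56/network-observability-platform | nedi_topology_integration.py | _parse_mysql_output
-- ===== SOURCE A (Python) =====
-- from typing import Dict, List, Optional
--
-- def _parse_mysql_output(output: str) -> List[Dict]:
--     """Parse mysql \\G formatted output into dictionaries.
--
--     Args:
--         output: MySQL output in \\G format
--
--     Returns:
--         List of dictionaries
--     """
--     results = []
--     current_record = {}
--
--     for line in output.strip().split("\n"):
--         line = line.strip()
--
--         if not line:
--             if current_record:
--                 results.append(current_record)
--                 current_record = {}
--             continue
--
--         if ": " in line:
--             key, value = line.split(": ", 1)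
--             current_record[key.lower().replace(" ", "_")] = value
--
--     if current_record:
--         results.append(current_record)
--
--     return results
-- ===== SOURCE B (Python) =====
-- def _parse_mysql_output(output: str) -> list:
--     """Group-first re-implementation: split stripped lines into blank-separated
--     groups, then map each group to a dict comprehension; keep non-empty dicts."""
--     lines = [ln.strip() for ln in output.strip().split("\n")]
--     groups = []
--     cur = []
--     for ln in lines:
--         if ln:
--             cur.append(ln)
--         else:
--             groups.append(cur)
--             cur = []
--     groups.append(cur)
--     records = []
--     for g in groups:
--         rec = {
--             ln.split(": ", 1)[0].lower().replace(" ", "_"): ln.split(": ", 1)[1]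
--             for ln in g
--             if ": " in ln
--         }
--         if rec:
--             records.append(rec)
--     return records
-- ===== Notes on version B (the rewrite author's own statement) =====
-- stated objective: alternative
-- what changed: Replaced the single stateful flush loop by a two-phase pipeline: first split the stripped lines into blank-separated groups, then map each group to a dict comprehension over its separator lines and keep the non-empty dicts.
import Mathlib
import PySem

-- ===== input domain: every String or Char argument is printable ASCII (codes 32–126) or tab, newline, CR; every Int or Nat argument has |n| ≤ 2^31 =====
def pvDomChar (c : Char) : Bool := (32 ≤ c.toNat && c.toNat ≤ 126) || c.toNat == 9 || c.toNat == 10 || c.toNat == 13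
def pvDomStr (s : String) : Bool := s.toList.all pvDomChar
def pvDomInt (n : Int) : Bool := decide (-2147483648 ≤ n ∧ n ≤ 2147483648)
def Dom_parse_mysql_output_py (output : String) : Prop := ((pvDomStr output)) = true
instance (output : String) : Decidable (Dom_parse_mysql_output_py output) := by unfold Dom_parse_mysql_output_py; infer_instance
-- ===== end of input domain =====

-- B re-organises A's one stateful flush loop into a group-first, parse-second pipeline (same cost; return value only, no mutation involved).

-- ===== PORT A =====
-- one step of A's loop: state = (results so far, current record)
def pvStepA (st : List (List (String × String)) × PySem.Dict String String) (rawLine : String) :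
    List (List (String × String)) × PySem.Dict String String :=
  let line := PySem.Str.strip rawLine
  if line = "" then
    (if st.2.items ≠ [] then (st.1 ++ [st.2.items], PySem.Dict.empty) else st)
  else if PySem.Str.isIn ": " line then
    let parts := (PySem.Str.splitMax? line ": " 1).getD []
    (st.1, st.2.insert (PySem.Str.replace (PySem.Str.lower (parts.getD 0 "")) " " "_") (parts.getD 1 ""))
  else st

def parse_mysql_output_py (output : String) : List (List (String × String)) :=
  let st := ((PySem.Str.split? (PySem.Str.strip output) "\n").getD []).foldl pvStepA ([], PySem.Dict.empty)
  if st.2.items ≠ [] then st.1 ++ [st.2.items] else st.1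

-- ===== PORT B =====
-- phase 1: accumulate blank-separated groups of (already stripped) lines
def pvGroupStep (st : List (List String) × List String) (ln : String) :
    List (List String) × List String :=
  if ln = "" then (st.1 ++ [st.2], []) else (st.1, st.2 ++ [ln])

-- phase 2: the dict comprehension over one group's ": " lines (insert-fold = comprehension)
def pvRecOf (g : List String) : List (String × String) :=
  (g.foldl (fun (rec : PySem.Dict String String) ln =>
      if PySem.Str.isIn ": " ln then
        let parts := (PySem.Str.splitMax? ln ": " 1).getD []
        rec.insert (PySem.Str.replace (PySem.Str.lower (parts.getD 0 "")) " " "_") (parts.getD 1 "")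
      else rec) PySem.Dict.empty).items

def parse_mysql_output_py_alt (output : String) : List (List (String × String)) :=
  let lines := ((PySem.Str.split? (PySem.Str.strip output) "\n").getD []).map PySem.Str.strip
  let st := lines.foldl pvGroupStep ([], [])
  ((st.1 ++ [st.2]).map pvRecOf).filter (fun r => decide (r ≠ []))

-- ===== PRECONDITION & SPEC =====
def Spec_parse_mysql_output_py (output : String) (out : List (List (String × String))) : Prop := out = parse_mysql_output_py_alt output
instance (output : String) (out : List (List (String × String))) : Decidable (Spec_parse_mysql_output_py output out) := by unfold Spec_parse_mysql_output_py; infer_instance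

-- ===== CLAIM (what is proved, stated in full; the proofs are below) =====
def Claim_equal_parse_mysql_output_py : Prop := ∀ (output : String), Dom_parse_mysql_output_py output → Spec_parse_mysql_output_py output (parse_mysql_output_py output)

-- ===== LEMMAS AND PROOFS =====

-- the dict underlying pvRecOf
def pvDictOf (g : List String) : PySem.Dict String String :=
  g.foldl (fun (rec : PySem.Dict String String) ln =>
      if PySem.Str.isIn ": " ln then
        let parts := (PySem.Str.splitMax? ln ": " 1).getD []
        rec.insert (PySem.Str.replace (PySem.Str.lower (parts.getD 0 "")) " " "_") (parts.getD 1 "")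
      else rec) PySem.Dict.empty

theorem pvRecOf_eq (g : List String) : pvRecOf g = (pvDictOf g).items := rfl

theorem pvDictOf_append_one (g : List String) (ln : String) :
    pvDictOf (g ++ [ln]) =
      (if PySem.Str.isIn ": " ln then
        let parts := (PySem.Str.splitMax? ln ": " 1).getD []
        (pvDictOf g).insert (PySem.Str.replace (PySem.Str.lower (parts.getD 0 "")) " " "_") (parts.getD 1 "")
      else pvDictOf g) := by
  simp [pvDictOf, List.foldl_append]

-- items empty → the dict is the empty dict
theorem pvDict_items_nil {d : PySem.Dict String String} (h : d.items = []) : d = PySem.Dict.empty := by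
  apply PySem.Dict.ext
  simpa using h

-- the main invariant: running A's loop from state (res, cur) agrees with B's pipeline
-- continued from group state (groups, curg), provided res/cur are the B-images of groups/curg
theorem pvMain (ls : List String) (groups : List (List String)) (curg : List String)
    (res : List (List (String × String))) (cur : PySem.Dict String String)
    (hres : res = (groups.map pvRecOf).filter (fun r => decide (r ≠ [])))
    (hcur : cur = pvDictOf curg) :
    (let st := ls.foldl pvStepA (res, cur)
     if st.2.items ≠ [] then st.1 ++ [st.2.items] else st.1)
    = (let st := (ls.map PySem.Str.strip).foldl pvGroupStep (groups, curg)
       ((st.1 ++ [st.2]).map pvRecOf).filter (fun r => decide (r ≠ []))) := by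
  induction ls generalizing groups curg res cur with
  | nil =>
    subst hres hcur
    simp only [List.foldl_nil, List.map_nil, List.map_append, List.filter_append, List.map_cons,
      List.filter_cons]
    by_cases h : (pvDictOf curg).items = []
    · simp [pvRecOf_eq, h]
    · simp [pvRecOf_eq, h]
  | cons l ls ih =>
    simp only [List.foldl_cons, List.map_cons]
    by_cases hb : PySem.Str.strip l = ""
    · have hgs : pvGroupStep (groups, curg) (PySem.Str.strip l) = (groups ++ [curg], []) := by
        simp only [pvGroupStep]; rw [if_pos hb]
      rw [hgs]
      by_cases h : cur.items = []
      · have hstep : pvStepA (res, cur) l = (res, cur) := by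
          simp only [pvStepA]; rw [if_pos hb, if_neg (by simpa using h)]
        rw [hstep]
        have hrec : pvRecOf curg = [] := by rw [pvRecOf_eq, ← hcur]; exact h
        refine ih (groups ++ [curg]) [] res cur ?_ ?_
        · rw [hres]; simp [List.filter_append, hrec]
        · rw [pvDict_items_nil h]; rfl
      · have hstep : pvStepA (res, cur) l = (res ++ [cur.items], PySem.Dict.empty) := by
          simp only [pvStepA]; rw [if_pos hb, if_pos h]
        rw [hstep]
        have hne : pvRecOf curg ≠ [] := by rw [pvRecOf_eq, ← hcur]; exact h
        refine ih (groups ++ [curg]) [] (res ++ [cur.items]) PySem.Dict.empty ?_ rfl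
        rw [hres, hcur, pvRecOf_eq] at *
        simp [List.filter_append, hne, pvRecOf_eq]
    · have hgs : pvGroupStep (groups, curg) (PySem.Str.strip l) = (groups, curg ++ [PySem.Str.strip l]) := by
        simp only [pvGroupStep]; rw [if_neg hb]
      rw [hgs]
      by_cases hc : PySem.Str.isIn ": " (PySem.Str.strip l) = true
      · have hstep : pvStepA (res, cur) l =
            (res, cur.insert
              (PySem.Str.replace (PySem.Str.lower
                (((PySem.Str.splitMax? (PySem.Str.strip l) ": " 1).getD []).getD 0 "")) " " "_")
              (((PySem.Str.splitMax? (PySem.Str.strip l) ": " 1).getD []).getD 1 "")) := by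
          simp only [pvStepA]; rw [if_neg hb, if_pos hc]
        rw [hstep]
        refine ih groups (curg ++ [PySem.Str.strip l]) res _ hres ?_
        rw [pvDictOf_append_one, if_pos hc, hcur]
      · have hstep : pvStepA (res, cur) l = (res, cur) := by
          simp only [pvStepA]; rw [if_neg hb, if_neg hc]
        rw [hstep]
        refine ih groups (curg ++ [PySem.Str.strip l]) res cur hres ?_
        rw [pvDictOf_append_one, if_neg hc, hcur]

-- ===== VERDICT (by name: the statement is the Claim_ definition above) =====
theorem parse_mysql_output_py_spec : Claim_equal_parse_mysql_output_py := by
  intro output _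
  unfold Spec_parse_mysql_output_py parse_mysql_output_py parse_mysql_output_py_alt
  exact pvMain ((PySem.Str.split? (PySem.Str.strip output) "\n").getD []) [] [] [] PySem.Dict.empty rfl rfl
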